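-- pv_equiv track=rewrite | github.com/ricardoricrob76/plp2024 | gerararquivo.py | gerar_frases_atendimento
-- ===== SOURCE A (Python) =====
-- def gerar_frases_atendimento(num_frases):
--     # Lista básica de frases de atendimento
--     frases = [
--         "Olá, como posso ajudá-lo hoje?",
--         "Obrigado por entrar em contato. Em que posso ajudar?",
--         "Estamos aqui para ajudar! Qual é o seu problema?",
--         "Como posso auxiliá-lo com sua solicitação?",
--         "Se precisar de assistência, estamos à disposição.",
--         "Por favor, forneça mais detalhes sobre o seu problema.",
--         "Estamos trabalhando para resolver a sua solicitação.",
--         "Desculpe pelo transtorno, vamos resolver isso o mais rápido possível.",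
--         "Agradecemos seu contato e estamos analisando a sua solicitação.",
--         "Qualquer dúvida, não hesite em nos chamar.",
--         "Estamos aqui para garantir que você tenha a melhor experiência possível.",
--         "Pode me informar mais detalhes para que eu possa ajudar?",
--         "Estamos verificando a sua solicitação e em breve entraremos em contato.",
--         "Obrigado por seu feedback, é muito importante para nós.",
--         "Estamos empenhados em resolver o seu problema o mais rápido possível.",
--         "Sua paciência é muito apreciada enquanto trabalhamos na solução.",
--         "Por favor, informe o número do seu pedido para que possamos verificar.",
--         "Vamos analisar o seu caso e retornaremos em breve.",
--         "Se precisar de mais informações, estamos à disposição.",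
--         "Estamos aqui para ajudar com qualquer questão que você tenha.",
--         # Adicione mais frases conforme necessário
--     ]
--
--     # Expandindo a lista até ter o número desejado de frases
--     while len(frases) < num_frases:
--         frases.extend(frases)  # Duplicar frases
--         frases = frases[:num_frases]  # Truncate to the desired length
--
--     return frases
-- ===== SOURCE B (Python) =====
-- def gerar_frases_atendimento(num_frases):
--     frases = [
--         "Olá, como posso ajudá-lo hoje?",
--         "Obrigado por entrar em contato. Em que posso ajudar?",
--         "Estamos aqui para ajudar! Qual é o seu problema?",
--         "Como posso auxiliá-lo com sua solicitação?",
--         "Se precisar de assistência, estamos à disposição.",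
--         "Por favor, forneça mais detalhes sobre o seu problema.",
--         "Estamos trabalhando para resolver a sua solicitação.",
--         "Desculpe pelo transtorno, vamos resolver isso o mais rápido possível.",
--         "Agradecemos seu contato e estamos analisando a sua solicitação.",
--         "Qualquer dúvida, não hesite em nos chamar.",
--         "Estamos aqui para garantir que você tenha a melhor experiência possível.",
--         "Pode me informar mais detalhes para que eu possa ajudar?",
--         "Estamos verificando a sua solicitação e em breve entraremos em contato.",
--         "Obrigado por seu feedback, é muito importante para nós.",
--         "Estamos empenhados em resolver o seu problema o mais rápido possível.",
--         "Sua paciência é muito apreciada enquanto trabalhamos na solução.",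
--         "Por favor, informe o número do seu pedido para que possamos verificar.",
--         "Vamos analisar o seu caso e retornaremos em breve.",
--         "Se precisar de mais informações, estamos à disposição.",
--         "Estamos aqui para ajudar com qualquer questão que você tenha.",
--     ]
--     n = max(len(frases), num_frases)
--     return [frases[i % len(frases)] for i in range(n)]
-- ===== Notes on version B (the rewrite author's own statement) =====
-- stated objective: idiomatic
-- what changed: Replaces A's repeated extend-and-truncate while loop (mutating the list until it is long enough) by a single index-modulo comprehension over range(max(len(base), num_frases)).
import Mathlib
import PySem

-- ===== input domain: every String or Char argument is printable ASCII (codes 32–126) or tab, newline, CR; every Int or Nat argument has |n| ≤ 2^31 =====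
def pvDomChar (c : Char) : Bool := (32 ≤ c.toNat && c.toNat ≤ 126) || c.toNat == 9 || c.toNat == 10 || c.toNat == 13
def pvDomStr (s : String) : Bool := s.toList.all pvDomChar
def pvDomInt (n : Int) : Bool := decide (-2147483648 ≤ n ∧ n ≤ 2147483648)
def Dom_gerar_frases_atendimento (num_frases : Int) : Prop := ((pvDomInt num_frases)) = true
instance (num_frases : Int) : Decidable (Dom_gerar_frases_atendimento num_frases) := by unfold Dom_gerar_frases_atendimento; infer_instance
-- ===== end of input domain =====

-- B replaces A's repeated extend-and-truncate while loop by a direct index-modulo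
-- comprehension of length max(len(base), num_frases) (objective: simpler/idiomatic).

-- the fixed base list of phrases (shared data of both ports)
def pvFrasesBase : List String := [
    "Olá, como posso ajudá-lo hoje?",
    "Obrigado por entrar em contato. Em que posso ajudar?",
    "Estamos aqui para ajudar! Qual é o seu problema?",
    "Como posso auxiliá-lo com sua solicitação?",
    "Se precisar de assistência, estamos à disposição.",
    "Por favor, forneça mais detalhes sobre o seu problema.",
    "Estamos trabalhando para resolver a sua solicitação.",
    "Desculpe pelo transtorno, vamos resolver isso o mais rápido possível.",
    "Agradecemos seu contato e estamos analisando a sua solicitação.",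
    "Qualquer dúvida, não hesite em nos chamar.",
    "Estamos aqui para garantir que você tenha a melhor experiência possível.",
    "Pode me informar mais detalhes para que eu possa ajudar?",
    "Estamos verificando a sua solicitação e em breve entraremos em contato.",
    "Obrigado por seu feedback, é muito importante para nós.",
    "Estamos empenhados em resolver o seu problema o mais rápido possível.",
    "Sua paciência é muito apreciada enquanto trabalhamos na solução.",
    "Por favor, informe o número do seu pedido para que possamos verificar.",
    "Vamos analisar o seu caso e retornaremos em breve.",
    "Se precisar de mais informações, estamos à disposição.",
    "Estamos aqui para ajudar com qualquer questão que você tenha."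
  ]

-- ===== PORT A =====
-- while len(frases) < num_frases: frases.extend(frases); frases = frases[:num_frases]
-- (fuel makes the loop total; it is always sufficient, see aLoop lemmas below)
def pvALoop : Nat → Int → List String → List String
  | 0, _, frases => frases
  | fuel+1, num_frases, frases =>
    if (frases.length : Int) < num_frases then
      pvALoop fuel num_frases (PySem.List.slice (frases ++ frases) none (some num_frases))
    else frases

def gerar_frases_atendimento (num_frases : Int) : List String :=
  pvALoop (num_frases.toNat + 1) num_frases pvFrasesBase

-- ===== PORT B =====
-- n = max(len(frases), num_frases); [frases[i % len(frases)] for i in range(n)]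
def gerar_frases_atendimento_alt (num_frases : Int) : List String :=
  (PySem.List.pyRange 0 (max ((pvFrasesBase.length : Int)) num_frases) 1).map
    (fun i => PySem.List.pyGetD pvFrasesBase (PySem.Int.mod i (pvFrasesBase.length : Int)) "")

-- ===== PRECONDITION & SPEC =====
def Spec_gerar_frases_atendimento (num_frases : Int) (out : List String) : Prop := out = gerar_frases_atendimento_alt num_frases
instance (num_frases : Int) (out : List String) : Decidable (Spec_gerar_frases_atendimento num_frases out) := by unfold Spec_gerar_frases_atendimento; infer_instance

-- ===== CLAIM (what is proved, stated in full; the proofs are below) =====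
def Claim_equal_gerar_frases_atendimento : Prop := ∀ (num_frases : Int), Dom_gerar_frases_atendimento num_frases → Spec_gerar_frases_atendimento num_frases (gerar_frases_atendimento num_frases)

-- ===== LEMMAS AND PROOFS =====
-- the cyclic list of length k built from the 20 base phrases
def pvCyc (k : Nat) : List String := (List.range k).map (fun i => pvFrasesBase.getD (i % 20) "")

theorem pvCyc_length (k : Nat) : (pvCyc k).length = k := by
  simp [pvCyc]

theorem pvCyc_20 : pvCyc 20 = pvFrasesBase := by decide

theorem pvCyc_append (k : Nat) (h : k % 20 = 0) : pvCyc k ++ pvCyc k = pvCyc (2 * k) := by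
  have h2 : 2 * k = k + k := by omega
  simp only [pvCyc]
  rw [h2, List.range_add, List.map_append, List.map_map]
  congr 1
  apply List.map_congr_left
  intro a _
  simp only [Function.comp]
  congr 1
  omega

theorem pvCyc_take (m k : Nat) : (pvCyc k).take m = pvCyc (min m k) := by
  simp only [pvCyc]
  rw [← List.map_take, List.take_range]

theorem pvALoop_stop (fuel : Nat) (n : Int) (fr : List String)
    (h : ¬ (fr.length : Int) < n) : pvALoop fuel n fr = fr := by
  cases fuel <;> simp [pvALoop, h]

theorem pvALoop_cyc (fuel : Nat) : ∀ (n : Int) (k : Nat), k % 20 = 0 → 20 ≤ k →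
    (k : Int) < n → n.toNat ≤ k + fuel → pvALoop fuel n (pvCyc k) = pvCyc n.toNat := by
  induction fuel with
  | zero => intro n k _ _ hlt hf; omega
  | succ fuel ih =>
    intro n k hmod h20 hlt hf
    rw [pvALoop, pvCyc_length, if_pos hlt,
        PySem.List.slice_to _ (by omega : (0:Int) ≤ n), pvCyc_append k hmod, pvCyc_take]
    by_cases h2 : ((min n.toNat (2 * k) : Nat) : Int) < n
    · have hk' : min n.toNat (2 * k) = 2 * k := by omega
      rw [hk'] at h2 ⊢
      exact ih n (2 * k) (by omega) (by omega) h2 (by omega)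
    · rw [pvALoop_stop fuel n _ (by rw [pvCyc_length]; exact h2)]
      congr 1
      omega

theorem pvAlt_eq_cyc (n : Int) : gerar_frases_atendimento_alt n = pvCyc (max 20 n.toNat) := by
  have hlen : (pvFrasesBase.length : Int) = 20 := by decide
  rw [gerar_frases_atendimento_alt, hlen, PySem.List.pyRange_one, List.map_map, pvCyc]
  have hK : (max n 20 - 0).toNat = max 20 n.toNat := by omega
  rw [max_comm (20:Int) n, hK]
  apply List.map_congr_left
  intro a _
  simp only [Function.comp, zero_add]
  have : PySem.Int.mod (a : Int) ((20 : Nat) : Int) = ((a % 20 : Nat) : Int) :=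
    PySem.Int.mod_natCast a 20
  rw [show ((20:Nat):Int) = (20:Int) by norm_num] at this
  rw [this, PySem.List.pyGetD_natCast]

-- ===== VERDICT (by name: the statement is the Claim_ definition above) =====
theorem gerar_frases_atendimento_spec : Claim_equal_gerar_frases_atendimento := by
  intro n _
  unfold Spec_gerar_frases_atendimento
  rw [pvAlt_eq_cyc, gerar_frases_atendimento, ← pvCyc_20]
  by_cases h : (20 : Int) < n
  · rw [pvALoop_cyc (n.toNat + 1) n 20 (by omega) (by omega)
        (by exact_mod_cast h) (by omega)]
    congr 1
    omega
  · rw [pvALoop_stop _ n _ (by rw [pvCyc_length]; omega)]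
    congr 1
    omega
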